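-- pv_equiv track=rewrite | github.com/Hetsvi/basics-data-science | basic.py | same_diff_ints
-- ===== SOURCE A (Python) =====
-- def same_diff_ints(ints):
--     """
--     same_diff_ints tests whether a list contains
--     two list elements i places apart, whose distance
--     as integers is also i.
--     """
--     for first in range (0, len(ints), 1):
--         for second in range (0, len(ints), 1):
--             math_difference = abs(ints[first] - ints[second])
--             index_difference = second - first
--             if index_difference != 0 and math_difference == index_difference:
--                 return True
--
--     return False
-- ===== SOURCE B (Python) =====
-- def same_diff_ints(ints):
--     """
--     same_diff_ints tests whether a list contains
--     two list elements i places apart, whose distance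
--     as integers is also i.
--     """
--     # |a[i]-a[j]| == j-i  <=>  a[i]-i == a[j]-j  or  a[i]+i == a[j]+j,
--     # so one pass tracking the two key sets suffices.
--     minus = set()
--     plus = set()
--     for k, v in enumerate(ints):
--         if v - k in minus or v + k in plus:
--             return True
--         minus.add(v - k)
--         plus.add(v + k)
--     return False
-- ===== Notes on version B (the rewrite author's own statement) =====
-- stated objective: faster
-- what changed: Replaces the quadratic all-pairs scan with a single pass maintaining two hash sets of the keys a[k]-k and a[k]+k, since |a[i]-a[j]| = j-i iff one of these keys repeats.
import Mathlib
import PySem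

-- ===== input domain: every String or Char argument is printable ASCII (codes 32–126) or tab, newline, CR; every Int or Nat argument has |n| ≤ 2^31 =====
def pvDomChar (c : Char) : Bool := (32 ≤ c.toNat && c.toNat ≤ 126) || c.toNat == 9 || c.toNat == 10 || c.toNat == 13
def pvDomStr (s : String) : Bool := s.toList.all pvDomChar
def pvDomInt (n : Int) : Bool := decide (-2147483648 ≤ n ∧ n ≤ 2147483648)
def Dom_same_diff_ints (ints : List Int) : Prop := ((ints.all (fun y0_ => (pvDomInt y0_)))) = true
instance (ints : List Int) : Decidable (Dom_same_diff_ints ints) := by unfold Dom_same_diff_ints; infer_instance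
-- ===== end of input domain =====

-- B replaces A's quadratic all-pairs scan by one pass over the list tracking the
-- key sets {a[k]-k} and {a[k]+k}; proved to return the same Bool on every input.

-- ===== PORT A =====
-- literal transliteration of A's nested for-loops with early 'return True'
def same_diff_ints (ints : List Int) : Bool :=
  (PySem.List.pyRange 0 ints.length 1).any (fun first =>
    (PySem.List.pyRange 0 ints.length 1).any (fun second =>
      let math_difference := |PySem.List.pyGetD ints first 0 - PySem.List.pyGetD ints second 0|
      let index_difference := second - first
      decide (index_difference ≠ 0 ∧ math_difference = index_difference)))

-- ===== PORT B =====
-- the loop of Source B: index k and the two sets 'minus' and 'plus'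
def sdiLoop : List Int → Int → PySem.Set Int → PySem.Set Int → Bool
  | [], _, _, _ => false
  | v :: rest, k, minus, plus =>
    if PySem.Set.contains minus (v - k) || PySem.Set.contains plus (v + k) then true
    else sdiLoop rest (k + 1) (PySem.Set.add minus (v - k)) (PySem.Set.add plus (v + k))

def same_diff_ints_alt (ints : List Int) : Bool :=
  sdiLoop ints 0 PySem.Set.empty PySem.Set.empty

-- ===== PRECONDITION & SPEC =====
def Spec_same_diff_ints (ints : List Int) (out : Bool) : Prop := out = same_diff_ints_alt ints
instance (ints : List Int) (out : Bool) : Decidable (Spec_same_diff_ints ints out) := by unfold Spec_same_diff_ints; infer_instance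

-- ===== CLAIM (what is proved, stated in full; the proofs are below) =====
def Claim_equal_same_diff_ints : Prop := ∀ (ints : List Int), Dom_same_diff_ints ints → Spec_same_diff_ints ints (same_diff_ints ints)

-- ===== LEMMAS AND PROOFS =====

-- the common characterisation: two positions i < j whose minus- or plus-keys collide
def sdiProp (a : List Int) : Prop :=
  ∃ j : Nat, ∃ _ : j < a.length, ∃ i : Nat, ∃ _ : i < j,
    (a[i]! - (i : Int) = a[j]! - (j : Int) ∨ a[i]! + (i : Int) = a[j]! + (j : Int))

lemma getBang_eq (l : List Int) (i : Nat) (h : i < l.length) : l[i]! = l[i] := by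
  simp [List.getElem!_eq_getElem?_getD, List.getElem?_eq_getElem h]

lemma A_iff (a : List Int) : same_diff_ints a = true ↔ sdiProp a := by
  unfold same_diff_ints sdiProp
  simp only [List.any_eq_true, PySem.List.mem_pyRange_one, decide_eq_true_eq]
  constructor
  · rintro ⟨f, ⟨hf0, hfn⟩, s, ⟨hs0, hsn⟩, hne, habs⟩
    have hvf : PySem.List.pyGetD a f 0 = a[f.toNat]! := by
      rw [PySem.List.pyGetD_eq_getElem a 0 hf0 hfn]
      exact (getBang_eq a f.toNat (by omega)).symm
    have hvs : PySem.List.pyGetD a s 0 = a[s.toNat]! := by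
      rw [PySem.List.pyGetD_eq_getElem a 0 hs0 hsn]
      exact (getBang_eq a s.toNat (by omega)).symm
    have hfs : f < s := by
      have := abs_nonneg (PySem.List.pyGetD a f 0 - PySem.List.pyGetD a s 0)
      omega
    rw [hvf, hvs] at habs
    have h1 : (f.toNat : Int) = f := Int.toNat_of_nonneg hf0
    have h2 : (s.toNat : Int) = s := Int.toNat_of_nonneg hs0
    refine ⟨s.toNat, by omega, f.toNat, by omega, ?_⟩
    rcases (abs_eq (by omega : (0:Int) ≤ s - f)).mp habs with h | h
    · right; omega
    · left; omega
  · rintro ⟨j, hj, i, hij, h⟩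
    have hvi : PySem.List.pyGetD a (i : Int) 0 = a[i]! := by
      rw [PySem.List.pyGetD_eq_getElem a 0 (by omega) (by exact_mod_cast Int.ofNat_lt.mpr (by omega))]
      simp only [Int.toNat_natCast]
      exact (getBang_eq a i (by omega)).symm
    have hvj : PySem.List.pyGetD a (j : Int) 0 = a[j]! := by
      rw [PySem.List.pyGetD_eq_getElem a 0 (by omega) (by exact_mod_cast Int.ofNat_lt.mpr hj)]
      simp only [Int.toNat_natCast]
      exact (getBang_eq a j hj).symm
    refine ⟨(i : Int), ⟨by omega, by omega⟩, (j : Int), ⟨by omega, by omega⟩, by omega, ?_⟩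
    rw [hvi, hvj, abs_eq (by omega : (0:Int) ≤ (j : Int) - (i : Int))]
    rcases h with h | h
    · right; omega
    · left; omega

lemma B_loop (rest : List Int) : ∀ (k : Int) (m p : PySem.Set Int),
    sdiLoop rest k m p = true ↔
      ∃ j : Nat, ∃ _ : j < rest.length,
        ((rest[j]! - (k + (j : Int)) ∈ m ∨
            ∃ i : Nat, ∃ _ : i < j, rest[i]! - (k + (i : Int)) = rest[j]! - (k + (j : Int))) ∨
         (rest[j]! + (k + (j : Int)) ∈ p ∨
            ∃ i : Nat, ∃ _ : i < j, rest[i]! + (k + (i : Int)) = rest[j]! + (k + (j : Int)))) := by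
  induction rest with
  | nil => intro k m p; simp [sdiLoop]
  | cons v rest ih =>
    intro k m p
    simp only [sdiLoop]
    by_cases hc : (PySem.Set.contains m (v - k) || PySem.Set.contains p (v + k)) = true
    · rw [if_pos hc]
      constructor
      · intro _
        refine ⟨0, by simp, ?_⟩
        simp only [Bool.or_eq_true] at hc
        rcases hc with h | h
        · left; left
          simpa only [List.getElem!_cons_zero, Nat.cast_zero, add_zero] using
            (PySem.Set.contains_iff m (v - k)).mp h
        · right; left
          simpa only [List.getElem!_cons_zero, Nat.cast_zero, add_zero] using
            (PySem.Set.contains_iff p (v + k)).mp h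
      · intro _; rfl
    · have hc2 := hc
      simp only [Bool.or_eq_true, not_or, Bool.not_eq_true] at hc2
      obtain ⟨hcm, hcp⟩ := hc2
      rw [if_neg hc, ih]
      constructor
      · rintro ⟨j, hj, hcase⟩
        refine ⟨j + 1, by simp only [List.length_cons]; omega, ?_⟩
        rcases hcase with (hm | ⟨i, hi, he⟩) | (hp | ⟨i, hi, he⟩)
        · rcases (PySem.Set.mem_add m (v - k) _).mp hm with hm' | heq
          · left; left
            simp only [List.getElem!_cons_succ]
            have hk : k + ((j : Nat) + 1 : Nat) = k + 1 + (j : Int) := by push_cast; ring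
            rw [hk]; exact hm'
          · left; right
            refine ⟨0, by omega, ?_⟩
            simp only [List.getElem!_cons_zero, List.getElem!_cons_succ]
            push_cast
            omega
        · left; right
          refine ⟨i + 1, by omega, ?_⟩
          simp only [List.getElem!_cons_succ]
          push_cast
          omega
        · rcases (PySem.Set.mem_add p (v + k) _).mp hp with hp' | heq
          · right; left
            simp only [List.getElem!_cons_succ]
            have hk : k + ((j : Nat) + 1 : Nat) = k + 1 + (j : Int) := by push_cast; ring
            rw [hk]; exact hp'
          · right; right
            refine ⟨0, by omega, ?_⟩
            simp only [List.getElem!_cons_zero, List.getElem!_cons_succ]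
            push_cast
            omega
        · right; right
          refine ⟨i + 1, by omega, ?_⟩
          simp only [List.getElem!_cons_succ]
          push_cast
          omega
      · rintro ⟨j, hj, hcase⟩
        cases j with
        | zero =>
          exfalso
          rcases hcase with (hm | ⟨i, hi, _⟩) | (hp | ⟨i, hi, _⟩)
          · simp only [List.getElem!_cons_zero, Nat.cast_zero, add_zero] at hm
            rw [(PySem.Set.contains_iff m (v - k)).mpr hm] at hcm
            exact Bool.noConfusion hcm
          · omega
          · simp only [List.getElem!_cons_zero, Nat.cast_zero, add_zero] at hp
            rw [(PySem.Set.contains_iff p (v + k)).mpr hp] at hcp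
            exact Bool.noConfusion hcp
          · omega
        | succ j =>
          refine ⟨j, by simp only [List.length_cons] at hj; omega, ?_⟩
          rcases hcase with (hm | ⟨i, hi, he⟩) | (hp | ⟨i, hi, he⟩)
          · left; left
            apply (PySem.Set.mem_add m (v - k) _).mpr
            left
            simp only [List.getElem!_cons_succ] at hm
            have hk : k + ((j : Nat) + 1 : Nat) = k + 1 + (j : Int) := by push_cast; ring
            rw [hk] at hm; exact hm
          · cases i with
            | zero =>
              left; left
              apply (PySem.Set.mem_add m (v - k) _).mpr
              right
              simp only [List.getElem!_cons_zero, List.getElem!_cons_succ] at he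
              push_cast at he ⊢
              omega
            | succ i =>
              left; right
              refine ⟨i, by omega, ?_⟩
              simp only [List.getElem!_cons_succ] at he
              push_cast at he ⊢
              omega
          · right; left
            apply (PySem.Set.mem_add p (v + k) _).mpr
            left
            simp only [List.getElem!_cons_succ] at hp
            have hk : k + ((j : Nat) + 1 : Nat) = k + 1 + (j : Int) := by push_cast; ring
            rw [hk] at hp; exact hp
          · cases i with
            | zero =>
              right; left
              apply (PySem.Set.mem_add p (v + k) _).mpr
              right
              simp only [List.getElem!_cons_zero, List.getElem!_cons_succ] at he
              push_cast at he ⊢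
              omega
            | succ i =>
              right; right
              refine ⟨i, by omega, ?_⟩
              simp only [List.getElem!_cons_succ] at he
              push_cast at he ⊢
              omega

lemma B_iff (a : List Int) : same_diff_ints_alt a = true ↔ sdiProp a := by
  unfold same_diff_ints_alt sdiProp
  rw [B_loop]
  simp only [PySem.Set.empty, List.not_mem_nil, false_or, zero_add]
  constructor
  · rintro ⟨j, hj, (⟨i, hi, he⟩ | ⟨i, hi, he⟩)⟩
    · exact ⟨j, hj, i, hi, Or.inl he⟩
    · exact ⟨j, hj, i, hi, Or.inr he⟩
  · rintro ⟨j, hj, i, hi, (he | he)⟩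
    · exact ⟨j, hj, Or.inl ⟨i, hi, he⟩⟩
    · exact ⟨j, hj, Or.inr ⟨i, hi, he⟩⟩

-- ===== VERDICT (by name: the statement is the Claim_ definition above) =====
theorem same_diff_ints_spec : Claim_equal_same_diff_ints := by
  intro ints _
  unfold Spec_same_diff_ints
  by_cases h : sdiProp ints
  · rw [(A_iff ints).mpr h, (B_iff ints).mpr h]
  · have hA : same_diff_ints ints = false := by
      cases hx : same_diff_ints ints
      · rfl
      · exact absurd ((A_iff ints).mp hx) h
    have hB : same_diff_ints_alt ints = false := by
      cases hx : same_diff_ints_alt ints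
      · rfl
      · exact absurd ((B_iff ints).mp hx) h
    rw [hA, hB]
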